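-- pv_equiv track=rewrite | github.com/calebredd/Graphs | projects/ancestor/ancestor.py | parentLen
-- ===== SOURCE A (Python) =====
-- def parentLen (ancestors, starting_node, generation = 0):
--     round = 0
--     for a in ancestors:
--         if a[1] == starting_node and round == 0:
--             generation +=1
--             round = 1
--             return parentLen(ancestors, a[0], generation)
--     return generation
-- ===== SOURCE B (Python) =====
-- def parentLen(ancestors, starting_node, generation=0):
--     parent = {}
--     for a in ancestors:
--         parent.setdefault(a[1], a[0])
--     node = starting_node
--     while node in parent:
--         generation += 1
--         node = parent[node]
--     return generation
-- ===== Notes on version B (the rewrite author's own statement) =====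
-- stated objective: alternative
-- what changed: B builds a child-to-parent dict once (first occurrence wins, matching A's first-match rule) and then walks it iteratively, instead of A's rescanning the whole list on every recursion level.
import Mathlib
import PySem

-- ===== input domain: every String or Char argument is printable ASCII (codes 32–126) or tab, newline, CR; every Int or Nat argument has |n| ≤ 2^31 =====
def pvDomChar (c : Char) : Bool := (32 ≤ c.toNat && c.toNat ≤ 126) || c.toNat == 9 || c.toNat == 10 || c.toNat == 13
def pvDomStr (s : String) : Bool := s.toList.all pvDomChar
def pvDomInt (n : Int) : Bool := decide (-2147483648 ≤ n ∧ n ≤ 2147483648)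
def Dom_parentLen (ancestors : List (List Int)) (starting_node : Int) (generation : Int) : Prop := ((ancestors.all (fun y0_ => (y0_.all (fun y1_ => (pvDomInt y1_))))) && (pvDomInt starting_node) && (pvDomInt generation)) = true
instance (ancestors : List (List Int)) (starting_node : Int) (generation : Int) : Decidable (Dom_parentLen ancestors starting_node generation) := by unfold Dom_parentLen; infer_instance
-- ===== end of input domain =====

-- B replaces A's per-level rescan+recursion by a child→parent dict built once and then walked
-- iteratively (objective: alternative; return value only, neither version mutates its arguments).

-- ===== PORT A =====
-- A's unbounded recursion is totalized with a fuel counter; a terminating run makes at most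
-- `ancestors.length` recursive calls (each consumes a distinct matching child), so fuel
-- `ancestors.length` is enough on every input admitted by Pre_. On fuel exhaustion (only
-- reachable on cyclic inputs, where Python raises RecursionError, excluded by Pre_) the port
-- returns the already incremented generation.
-- `a[1]` is `PySem.List.pyGet? a 1` (none = IndexError, a non-match here; Python raises there, excluded by
-- Pre_); when it is `some`, the row has ≥ 2 entries, so `a[0]` is total and ported as `pyGetD 0 0`.
def parentLenA (fuel : Nat) (full : List (List Int)) : List (List Int) → Int → Int → Int → Int
  | [], _, gen, _ => gen
  | a :: rest, node, gen, round =>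
    if PySem.List.pyGet? a 1 = some node ∧ round = 0 then
      match fuel with
      | 0 => gen + 1
      | f + 1 => parentLenA f full full (PySem.List.pyGetD a 0 0) (gen + 1) 0
    else
      parentLenA fuel full rest node gen round
termination_by rem _ _ _ => (fuel, rem)

def parentLen (ancestors : List (List Int)) (starting_node : Int) (generation : Int) : Int :=
  parentLenA ancestors.length ancestors ancestors starting_node generation 0

-- ===== PORT B =====
-- Source B: parent = {}; for a in ancestors: parent.setdefault(a[1], a[0]).
-- Rows where `a[1]` raises IndexError in Python (outside Pre_) are skipped here.
def buildParent (ancestors : List (List Int)) : PySem.Dict Int Int :=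
  ancestors.foldl
    (fun d a =>
      match PySem.List.pyGet? a 1 with
      | some k => d.setdefault k (PySem.List.pyGetD a 0 0)
      | none => d)
    PySem.Dict.empty

-- Source B's `while node in parent` loop, totalized with fuel (the walk visits distinct keys of the
-- dict whenever it ends; on a cyclic input, excluded by Pre_, Python B loops forever).
def walkB (parent : PySem.Dict Int Int) : Nat → Int → Int → Int
  | 0, _, gen => gen
  | f + 1, node, gen =>
    match parent.get? node with
    | none => gen
    | some p => walkB parent f p (gen + 1)

def parentLen_alt (ancestors : List (List Int)) (starting_node : Int) (generation : Int) : Int :=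
  walkB (buildParent ancestors) (ancestors.length + 1) starting_node generation

-- ===== PRECONDITION & SPEC =====
-- first row whose entry 1 equals `node`, mapped to its entry 0 (Pre_-layer lookup, independent of both ports)
def parentOf? (ancestors : List (List Int)) (node : Int) : Option Int :=
  (ancestors.find? (fun a => PySem.List.pyGet? a 1 == some node)).map (fun a => PySem.List.pyGetD a 0 0)

-- one application of the (first-match) parent map; `none` once the chain has ended
def stepParent (ancestors : List (List Int)) : Option Int → Option Int
  | some node => parentOf? ancestors node
  | none => none

-- Pre_ excludes exactly the inputs on which Python A raises: a row with fewer than 2 entries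
-- (IndexError — A's final pass over the list indexes every row), or a parent chain from
-- starting_node that never dies out (a cycle reachable from starting_node: RecursionError).
-- A chain that ends does so within ancestors.length steps (each step consumes a distinct child
-- entry), so `ancestors.length + 1` applications of the parent map exclude no ending chain.
def Pre_parentLen (ancestors : List (List Int)) (starting_node : Int) (generation : Int) : Prop :=
  (∀ a ∈ ancestors, 2 ≤ a.length) ∧
    (stepParent ancestors)^[ancestors.length + 1] (some starting_node) = none

instance (ancestors : List (List Int)) (starting_node : Int) (generation : Int) : Decidable (Pre_parentLen ancestors starting_node generation) := by unfold Pre_parentLen; infer_instance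

def pvWitness_parentLen : List (List Int) × Int × Int := ([[1, 2], [0, 1]], 2, 0)

def Spec_parentLen (ancestors : List (List Int)) (starting_node : Int) (generation : Int) (out : Int) : Prop := out = parentLen_alt ancestors starting_node generation
instance (ancestors : List (List Int)) (starting_node : Int) (generation : Int) (out : Int) : Decidable (Spec_parentLen ancestors starting_node generation out) := by unfold Spec_parentLen; infer_instance

-- ===== CLAIM (what is proved, stated in full; the proofs are below) =====
def Claim_equal_parentLen : Prop := ∀ (ancestors : List (List Int)) (starting_node : Int) (generation : Int), Dom_parentLen ancestors starting_node generation → Pre_parentLen ancestors starting_node generation → Spec_parentLen ancestors starting_node generation (parentLen ancestors starting_node generation)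

-- ===== LEMMAS AND PROOFS =====

-- first-match lookup, as one function (proof layer)
def findM (rows : List (List Int)) (node : Int) : Option Int :=
  match rows with
  | [] => none
  | a :: rest => if PySem.List.pyGet? a 1 = some node then some (PySem.List.pyGetD a 0 0) else findM rest node

theorem setdefault_get? (d : PySem.Dict Int Int) (k v x : Int) :
    (d.setdefault k v).get? x = (d.get? x).or (if k = x then some v else none) := by
  by_cases hc : d.contains k = true
  · have hd : d.setdefault k v = d := by simp [PySem.Dict.setdefault, hc]
    rw [hd]
    by_cases hk : k = x
    · subst hk
      have hs := PySem.Dict.contains_eq_isSome_get? (d := d) (k := k)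
      rw [hc] at hs
      cases hg : d.get? k with
      | none => rw [hg] at hs; simp at hs
      | some w => simp
    · simp [hk]
  · have hc' : d.contains k = false := by simpa using hc
    have hins : d.setdefault k v = d.insert k v := by
      simp [PySem.Dict.setdefault, PySem.Dict.insert, hc']
    have hnone : d.get? k = none := by
      rw [PySem.Dict.get?_eq_none_iff_contains]; exact hc'
    rw [hins, PySem.Dict.get?_insert]
    by_cases hk : x = k
    · subst hk; simp [hnone]
    · have hkx : ¬ k = x := fun h => hk h.symm
      simp [hk, hkx]

-- the dict built by B answers exactly the first-match lookup
theorem buildParent_get? (rows : List (List Int)) (d : PySem.Dict Int Int) (node : Int) :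
    (rows.foldl
        (fun d a =>
          match PySem.List.pyGet? a 1 with
          | some k => d.setdefault k (PySem.List.pyGetD a 0 0)
          | none => d)
        d).get? node = (d.get? node).or (findM rows node) := by
  induction rows generalizing d with
  | nil => simp [findM]
  | cons a rest ih =>
    rw [List.foldl_cons]
    cases h1 : PySem.List.pyGet? a 1 with
    | none =>
      rw [ih]
      simp [findM, h1]
    | some k =>
      rw [ih, setdefault_get?, Option.or_assoc]
      congr 1
      by_cases hk : k = node
      · subst hk; simp [findM, h1]
      · simp [findM, h1, hk]

-- A's scan of the remaining rows is the first-match lookup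
theorem parentLenA_scan (fuel : Nat) (full rem : List (List Int)) (node gen : Int) :
    parentLenA fuel full rem node gen 0 =
      match findM rem node with
      | none => gen
      | some p =>
        match fuel with
        | 0 => gen + 1
        | f + 1 => parentLenA f full full p (gen + 1) 0 := by
  induction rem with
  | nil => simp [parentLenA, findM]
  | cons a rest ih =>
    by_cases h : PySem.List.pyGet? a 1 = some node
    · cases fuel <;> simp [parentLenA, findM, h]
    · rw [parentLenA.eq_def]
      simp [findM, h]
      exact ih

-- the two walks agree level by level (B gets one extra fuel unit for its final lookup)
theorem walk_eq (anc : List (List Int)) (f : Nat) (node gen : Int) :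
    parentLenA f anc anc node gen 0 = walkB (buildParent anc) (f + 1) node gen := by
  induction f generalizing node gen with
  | zero =>
    rw [parentLenA_scan, walkB]
    have h := buildParent_get? anc PySem.Dict.empty node
    simp only [PySem.Dict.get?_empty, Option.none_or] at h
    rw [show (buildParent anc).get? node = findM anc node from h]
    cases findM anc node <;> simp [walkB]
  | succ g ih =>
    rw [parentLenA_scan, walkB]
    have h := buildParent_get? anc PySem.Dict.empty node
    simp only [PySem.Dict.get?_empty, Option.none_or] at h
    rw [show (buildParent anc).get? node = findM anc node from h]
    cases findM anc node with
    | none => rfl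
    | some p => exact ih p (gen + 1)

theorem parentLen_spec : Claim_equal_parentLen := by
  intro ancestors starting_node generation _ _
  unfold Spec_parentLen parentLen parentLen_alt
  exact walk_eq ancestors ancestors.length starting_node generation
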